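-- pv_equiv track=rewrite | github.com/MartinKoubek/retail-backoffice-ai | backoffice/ai.py | _recommended_action
-- ===== SOURCE A (Python) =====
-- from typing import Dict, List
--
-- def _recommended_action(validation_results: List[Dict]) -> str:
--     has_errors = any(item["level"] == "error" for item in validation_results)
--     has_warnings = any(item["level"] == "warning" for item in validation_results)
--     if has_errors:
--         return "reject"
--     if has_warnings:
--         return "request_correction"
--     return "approve"
-- ===== SOURCE B (Python) =====
-- from typing import Dict, List
--
-- def _recommended_action(validation_results: List[Dict]) -> str:
--     severity = 0
--     for item in validation_results:
--         level = item["level"]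
--         if level == "error":
--             severity = max(severity, 2)
--         elif level == "warning":
--             severity = max(severity, 1)
--     if severity == 2:
--         return "reject"
--     if severity == 1:
--         return "request_correction"
--     return "approve"
-- ===== Notes on version B (the rewrite author's own statement) =====
-- stated objective: alternative
-- what changed: Replaces A's two separate any() scans plus an if-chain by a single fold computing a max-severity number (error=2, warning=1) that is mapped to the action string afterwards.
-- outside the precondition, e.g. on _recommended_action([{'level': 'warning'}, {'level': 'error'}, {}]): A returns 'reject', B raises KeyError
import Mathlib
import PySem

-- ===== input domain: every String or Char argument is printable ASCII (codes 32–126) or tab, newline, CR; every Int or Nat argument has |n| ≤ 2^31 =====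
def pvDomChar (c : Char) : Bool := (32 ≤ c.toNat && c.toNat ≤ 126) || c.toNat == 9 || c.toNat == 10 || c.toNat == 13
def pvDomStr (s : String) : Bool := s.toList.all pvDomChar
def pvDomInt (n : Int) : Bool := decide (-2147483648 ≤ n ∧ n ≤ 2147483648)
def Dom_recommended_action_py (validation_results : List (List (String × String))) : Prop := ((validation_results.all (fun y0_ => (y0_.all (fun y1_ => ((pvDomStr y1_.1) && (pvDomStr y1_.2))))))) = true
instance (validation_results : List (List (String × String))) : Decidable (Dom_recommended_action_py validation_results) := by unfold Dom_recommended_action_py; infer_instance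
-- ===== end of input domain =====

-- B replaces A's two any() scans and if-chain by a single max-severity fold mapped to a string afterwards (alternative decomposition, same cost).


-- shared helper: item["level"] as first-match lookup in the association list (none = KeyError, excluded by Pre_)
def pvLevel? (item : List (String × String)) : Option String :=
  (item.find? (fun p => p.1 == "level")).map (·.2)

-- ===== PORT A =====
def recommended_action_py (validation_results : List (List (String × String))) : String :=
  let has_errors := validation_results.any (fun item => pvLevel? item == some "error")
  let has_warnings := validation_results.any (fun item => pvLevel? item == some "warning")
  if has_errors then "reject"
  else if has_warnings then "request_correction"
  else "approve"

-- ===== PORT B =====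
def recommended_action_py_alt (validation_results : List (List (String × String))) : String :=
  let severity : Int := validation_results.foldl (fun s item =>
    let level := pvLevel? item
    if level == some "error" then max s 2
    else if level == some "warning" then max s 1
    else s) 0
  if severity == 2 then "reject"
  else if severity == 1 then "request_correction"
  else "approve"

-- ===== PRECONDITION & SPEC =====
-- Pre_ excludes lists in which some item lacks the "level" key: depending on where such an item
-- sits relative to the first error/warning, Python A either raises KeyError or returns early,
-- and B (which scans the whole list once) raises KeyError there.
def Pre_recommended_action_py (validation_results : List (List (String × String))) : Prop :=
  (validation_results.all (fun item => (pvLevel? item).isSome)) = true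
instance (validation_results : List (List (String × String))) : Decidable (Pre_recommended_action_py validation_results) := by unfold Pre_recommended_action_py; infer_instance
def pvWitness_recommended_action_py : (List (List (String × String))) := [[("level", "error")], [("level", "info")]]

def Spec_recommended_action_py (validation_results : List (List (String × String))) (out : String) : Prop := out = recommended_action_py_alt validation_results
instance (validation_results : List (List (String × String))) (out : String) : Decidable (Spec_recommended_action_py validation_results out) := by unfold Spec_recommended_action_py; infer_instance

-- ===== CLAIM (what is proved, stated in full; the proofs are below) =====
def Claim_equal_recommended_action_py : Prop := ∀ (validation_results : List (List (String × String))), Dom_recommended_action_py validation_results → Pre_recommended_action_py validation_results → Spec_recommended_action_py validation_results (recommended_action_py validation_results)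

-- ===== LEMMAS AND PROOFS =====

-- the fold's step function (definitionally equal to the one inside port B)
def pvStep (s : Int) (item : List (String × String)) : Int :=
  if pvLevel? item == some "error" then max s 2
  else if pvLevel? item == some "warning" then max s 1
  else s

theorem pvStep_nonneg (s : Int) (hs : 0 ≤ s) (item : List (String × String)) : 0 ≤ pvStep s item := by
  unfold pvStep; split_ifs <;> omega

-- the fold's final severity, characterised by the two any-scans of A
theorem pv_fold_char (l : List (List (String × String))) : ∀ s : Int, 0 ≤ s →
    l.foldl pvStep s
    = max s (if l.any (fun item => pvLevel? item == some "error") then 2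
             else if l.any (fun item => pvLevel? item == some "warning") then 1 else 0) := by
  induction l with
  | nil => intro s hs; simp; omega
  | cons a t ih =>
    intro s hs
    simp only [List.foldl_cons, List.any_cons]
    rw [ih _ (pvStep_nonneg s hs a)]
    unfold pvStep
    by_cases he : (pvLevel? a == some "error") = true
    · simp [he]; split_ifs <;> omega
    · by_cases hw : (pvLevel? a == some "warning") = true
      · simp [he, hw]; split_ifs <;> omega
      · simp [he, hw]

-- ===== VERDICT (by name: the statement is the Claim_ definition above) =====
theorem recommended_action_py_spec : Claim_equal_recommended_action_py := by
  intro l _ _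
  show recommended_action_py l = recommended_action_py_alt l
  unfold recommended_action_py recommended_action_py_alt
  rw [show (fun (s : Int) (item : List (String × String)) =>
        let level := pvLevel? item
        if level == some "error" then max s 2
        else if level == some "warning" then max s 1
        else s) = pvStep from rfl]
  rw [pv_fold_char l 0 le_rfl]
  by_cases he : (l.any (fun item => pvLevel? item == some "error")) = true
  · simp [he]
  · by_cases hw : (l.any (fun item => pvLevel? item == some "warning")) = true
    · simp [he, hw]
    · simp [he, hw]
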